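-- pv_equiv track=rewrite | github.com/harinders9203/Incidence | soc_ready.py | _parse_wmic_output
-- ===== SOURCE A (Python) =====
-- def _parse_wmic_output(output):
--     """Parse wmic service output"""
--     services = []
--     lines = output.strip().split('\n')
--
--     if len(lines) < 2:
--         return services
--
--     headers = [h.strip() for h in lines[0].split(',')]
--
--     for line in lines[1:]:
--         if line.strip():
--             try:
--                 values = [v.strip() for v in line.split(',')]
--                 if len(values) >= len(headers):
--                     service = dict(zip(headers, values))
--                     # Clean up the service data
--                     cleaned_service = {
--                         'name': service.get('Name', '').strip(),
--                         'display_name': service.get('DisplayName', '').strip(),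
--                         'state': service.get('State', '').strip(),
--                         'start_mode': service.get('StartMode', '').strip(),
--                         'path_name': service.get('PathName', '').strip(),
--                         'process_id': service.get('ProcessId', '').strip()
--                     }
--                     if cleaned_service['name']:  # Only add if we have a name
--                         services.append(cleaned_service)
--             except Exception as e:
--                 continue
--
--     return services
-- ===== SOURCE B (Python) =====
-- def _parse_wmic_output(output):
--     """Columnar parse: extract each target field as a whole column, then recombine rows."""
--     lines = output.strip().split('\n')
--     if len(lines) < 2:
--         return []
--     headers = [h.strip() for h in lines[0].split(',')]
--
--     # stage 1: rows of stripped cell values passing the structural guards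
--     rows = []
--     for line in lines[1:]:
--         if line.strip():
--             vals = [v.strip() for v in line.split(',')]
--             if len(vals) >= len(headers):
--                 rows.append(vals)
--
--     # stage 2: one whole column per target field (last matching header wins)
--     def column(src):
--         j = None
--         for i, h in enumerate(headers):
--             if h == src:
--                 j = i
--         if j is None:
--             return [''] * len(rows)
--         return [row[j] for row in rows]
--
--     fields = [('name', 'Name'), ('display_name', 'DisplayName'),
--               ('state', 'State'), ('start_mode', 'StartMode'),
--               ('path_name', 'PathName'), ('process_id', 'ProcessId')]
--     cols = [(key, column(src)) for key, src in fields]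
--     names = cols[0][1]
--
--     # stage 3: recombine columns into records, keeping only named rows
--     return [{key: col[i] for key, col in cols}
--             for i in range(len(rows)) if names[i]]
-- ===== Notes on version B (the rewrite author's own statement) =====
-- stated objective: alternative
-- what changed: B is columnar/staged: it first collects valid rows, then extracts each of the six target fields as a whole column via one last-occurrence header index, and finally recombines the columns into records by row index, instead of A's single loop that builds a full dict(zip) per row and does six .get lookups.
import Mathlib
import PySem

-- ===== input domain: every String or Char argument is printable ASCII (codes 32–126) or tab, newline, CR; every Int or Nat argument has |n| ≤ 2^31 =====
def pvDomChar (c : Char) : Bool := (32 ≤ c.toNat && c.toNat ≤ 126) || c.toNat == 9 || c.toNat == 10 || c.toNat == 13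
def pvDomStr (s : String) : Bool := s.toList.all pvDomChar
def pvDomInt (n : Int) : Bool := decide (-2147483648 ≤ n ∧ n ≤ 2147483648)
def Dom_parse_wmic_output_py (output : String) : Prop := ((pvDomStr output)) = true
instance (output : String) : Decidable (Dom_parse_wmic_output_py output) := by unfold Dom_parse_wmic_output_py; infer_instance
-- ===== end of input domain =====

-- B parses columnar: it first collects the valid rows, then extracts each target
-- field as a whole column, and finally recombines columns into records
-- (objective: alternative, a different data layout / staged passes instead of
-- per-row dict(zip)+.get construction).


-- ===== PORT A =====
-- loop body of A's for-loop, one Python iteration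
def pvA_row (headers : List String) (services : List (List (String × String)))
    (line : String) : List (List (String × String)) :=
  if PySem.Str.strip line ≠ "" then
    let values := ((PySem.Str.split? line ",").getD []).map PySem.Str.strip
    if headers.length ≤ values.length then
      let service := PySem.Dict.ofList (headers.zip values)
      let nameV := PySem.Str.strip (service.getD "Name" "")
      let cleaned : List (String × String) :=
        [("name", nameV),
         ("display_name", PySem.Str.strip (service.getD "DisplayName" "")),
         ("state", PySem.Str.strip (service.getD "State" "")),
         ("start_mode", PySem.Str.strip (service.getD "StartMode" "")),
         ("path_name", PySem.Str.strip (service.getD "PathName" "")),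
         ("process_id", PySem.Str.strip (service.getD "ProcessId" ""))]
      if nameV ≠ "" then services ++ [cleaned] else services
    else services
  else services

def parse_wmic_output_py (output : String) : List (List (String × String)) :=
  let lines := (PySem.Str.split? (PySem.Str.strip output) "\n").getD []
  if lines.length < 2 then []
  else
    let headers := ((PySem.Str.split? (lines.getD 0 "") ",").getD []).map PySem.Str.strip
    (lines.drop 1).foldl (pvA_row headers) []

-- ===== PORT B =====
def pvFields : List (String × String) :=
  [("name", "Name"), ("display_name", "DisplayName"), ("state", "State"),
   ("start_mode", "StartMode"), ("path_name", "PathName"), ("process_id", "ProcessId")]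

-- stage 1: `rows.append(vals)` loop
def pvRows (headers : List String) (lines : List String) : List (List String) :=
  lines.foldl (fun rows line =>
    if PySem.Str.strip line ≠ "" then
      let vals := ((PySem.Str.split? line ",").getD []).map PySem.Str.strip
      if headers.length ≤ vals.length then rows ++ [vals] else rows
    else rows) []

-- `j = None; for i, h in enumerate(headers): if h == src: j = i`
def pvLastIdx (headers : List String) (src : String) : Option Int :=
  (PySem.List.enumerate headers 0).foldl
    (fun j p => if p.2 = src then some p.1 else j) none

-- stage 2: `column(src)`; the index j is in range for every kept row, so
-- `row[j]` is ported as pyGetD (the default is never reached)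
def pvColumn (headers : List String) (rows : List (List String)) (src : String) :
    List String :=
  match pvLastIdx headers src with
  | none => List.replicate rows.length ""
  | some j => rows.map (fun row => PySem.List.pyGetD row j "")

def parse_wmic_output_py_alt (output : String) : List (List (String × String)) :=
  let lines := (PySem.Str.split? (PySem.Str.strip output) "\n").getD []
  if lines.length < 2 then []
  else
    let headers := ((PySem.Str.split? (lines.getD 0 "") ",").getD []).map PySem.Str.strip
    let rows := pvRows headers (lines.drop 1)
    let cols := pvFields.map (fun f => (f.1, pvColumn headers rows f.2))
    let names := (cols.getD 0 ("", [])).2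
    ((PySem.List.pyRange 0 rows.length 1).filter
        (fun i => PySem.List.pyGetD names i "" ≠ "")).map
      (fun i => cols.map (fun c => (c.1, PySem.List.pyGetD c.2 i "")))

-- ===== PRECONDITION & SPEC =====
def Spec_parse_wmic_output_py (output : String) (out : List (List (String × String))) : Prop := out = parse_wmic_output_py_alt output
instance (output : String) (out : List (List (String × String))) : Decidable (Spec_parse_wmic_output_py output out) := by unfold Spec_parse_wmic_output_py; infer_instance

-- ===== CLAIM (what is proved, stated in full; the proofs are below) =====
def Claim_equal_parse_wmic_output_py : Prop := ∀ (output : String), Dom_parse_wmic_output_py output → Spec_parse_wmic_output_py output (parse_wmic_output_py output)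

-- ===== LEMMAS AND PROOFS =====

-- positional read of field `src` from one row, via the last-occurrence index
def pvF (headers : List String) (src : String) (vals : List String) : String :=
  match pvLastIdx headers src with
  | some j => PySem.List.pyGetD vals j ""
  | none => ""

-- the record B produces for one row
def pvRec (headers : List String) (vals : List String) : List (String × String) :=
  pvFields.map (fun fd => (fd.1, pvF headers fd.2 vals))

-- proof-only: header -> last index as a dict, to bridge dict(zip) with pvLastIdx
def pvColIndex (headers : List String) : PySem.Dict String Int :=
  (PySem.List.enumerate headers 0).foldl (fun d p => d.insert p.2 p.1) PySem.Dict.empty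

lemma pv_lstrip_of_lstrip_prefix (p : Char → Bool) (y w : List Char)
    (hy : y.dropWhile p = y) (hw : w <+: y) : w.dropWhile p = w := by
  rw [List.dropWhile_eq_self_iff]
  intro hl
  have hyl : 0 < y.length := lt_of_lt_of_le hl hw.length_le
  have h0 : w[0] = y[0] := hw.getElem hl
  have := List.dropWhile_eq_self_iff.mp hy hyl
  rw [h0]; exact this

lemma pv_chars_strip_strip (cs : List Char) :
    PySem.Chars.strip (PySem.Chars.strip cs) = PySem.Chars.strip cs := by
  unfold PySem.Chars.strip PySem.Chars.rstrip PySem.Chars.lstrip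
  set p := PySem.Chars.isspace
  set y := cs.dropWhile p with hy
  have hyy : y.dropWhile p = y := by rw [hy]; exact List.dropWhile_idempotent p cs
  set r := (y.reverse.dropWhile p).reverse with hr
  have hrp : r <+: y := by
    have h2 : (y.reverse.dropWhile p).reverse <+: y.reverse.reverse :=
      List.reverse_prefix.mpr (List.dropWhile_suffix p)
    simpa [hr] using h2
  have h1 : r.dropWhile p = r := pv_lstrip_of_lstrip_prefix p y r hyy hrp
  rw [h1, hr, List.reverse_reverse, List.dropWhile_idempotent]

lemma pv_strip_strip (s : String) :
    PySem.Str.strip (PySem.Str.strip s) = PySem.Str.strip s := by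
  unfold PySem.Str.strip
  simp [pv_chars_strip_strip]

lemma pv_mem_of_pyGet? {α : Type} (xs : List α) (j : Int) (v : α)
    (h : PySem.List.pyGet? xs j = some v) : v ∈ xs := by
  unfold PySem.List.pyGet? at h
  cases hk : PySem.List.pyIdx? xs.length j with
  | none => rw [hk] at h; simp at h
  | some k => rw [hk] at h; exact List.mem_of_getElem? h

lemma pv_strip_pyGetD (raw : List String) (j : Int) :
    PySem.Str.strip (PySem.List.pyGetD (raw.map PySem.Str.strip) j "")
      = PySem.List.pyGetD (raw.map PySem.Str.strip) j "" := by
  unfold PySem.List.pyGetD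
  cases h : PySem.List.pyGet? (raw.map PySem.Str.strip) j with
  | none => rfl
  | some v =>
    have hv : v ∈ raw.map PySem.Str.strip := pv_mem_of_pyGet? _ j v h
    obtain ⟨u, _, rfl⟩ := List.mem_map.mp hv
    simpa using pv_strip_strip u

lemma pv_zip_enum (full : List String) :
    ∀ (hl : List String) (i : Nat) (d : PySem.Dict String String) (e : PySem.Dict String Int),
    i + hl.length ≤ full.length →
    (∀ k, d.get? k = (e.get? k).map (fun j => PySem.List.pyGetD full j "")) →
    ∀ k, ((hl.zip (full.drop i)).foldl (fun acc p => acc.insert p.1 p.2) d).get? k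
      = (((PySem.List.enumerate hl (i : Int)).foldl (fun d p => d.insert p.2 p.1) e).get? k).map
          (fun j => PySem.List.pyGetD full j "") := by
  intro hl
  induction hl with
  | nil => intro i d e _ inv k; simpa [PySem.List.enumerate] using inv k
  | cons h t ih =>
    intro i d e hle inv k
    have hi : i < full.length := by simp at hle; omega
    have hdrop : full.drop i = full[i] :: full.drop (i + 1) :=
      List.drop_eq_getElem_cons hi
    rw [hdrop, PySem.List.enumerate_cons]
    simp only [List.zip_cons_cons, List.foldl_cons]
    have : ((i : Int) + 1) = ((i + 1 : Nat) : Int) := by push_cast; ring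
    rw [this]
    apply ih (i + 1) (d.insert h full[i]) (e.insert h (i : Int))
    · simp at hle ⊢; omega
    · intro k'
      rw [PySem.Dict.get?_insert, PySem.Dict.get?_insert]
      by_cases hk : k' = h
      · simp [hk, PySem.List.pyGetD_natCast, List.getD_eq_getElem?_getD, hi]
      · simp [hk, inv k']

-- the index dict and B's last-index scan agree
lemma pv_colIndex_eq_lastIdx (headers : List String) (k : String) :
    (pvColIndex headers).get? k = pvLastIdx headers k := by
  unfold pvColIndex pvLastIdx
  generalize PySem.List.enumerate headers 0 = l
  suffices h : ∀ (l : List (Int × String)) (d : PySem.Dict String Int) (a : Option Int),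
      d.get? k = a →
      (l.foldl (fun d p => d.insert p.2 p.1) d).get? k
        = l.foldl (fun a p => if p.2 = k then some p.1 else a) a by
    exact h l PySem.Dict.empty none (by simp)
  intro l
  induction l with
  | nil => intro d a h; simpa using h
  | cons p t ih =>
    intro d a h
    simp only [List.foldl_cons]
    apply ih
    rw [PySem.Dict.get?_insert]
    by_cases hk : k = p.2
    · simp [hk]
    · have hk2 : ¬(p.2 = k) := fun hh => hk hh.symm
      simp [hk, hk2, h]

-- A's per-row field value equals B's positional read (rows already stripped)
lemma pv_row_field (headers raw : List String)
    (hle : headers.length ≤ (raw.map PySem.Str.strip).length) (k : String) :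
    PySem.Str.strip ((PySem.Dict.ofList (headers.zip (raw.map PySem.Str.strip))).getD k "")
      = pvF headers k (raw.map PySem.Str.strip) := by
  have hz := pv_zip_enum (raw.map PySem.Str.strip) headers 0 PySem.Dict.empty PySem.Dict.empty
    (by simpa using hle) (by intro k'; simp) k
  simp only [List.drop_zero, Nat.cast_zero] at hz
  rw [PySem.Dict.getD_eq_get?_getD]
  have hof : PySem.Dict.ofList (headers.zip (raw.map PySem.Str.strip))
      = (headers.zip (raw.map PySem.Str.strip)).foldl (fun acc p => acc.insert p.1 p.2)
          PySem.Dict.empty := rfl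
  rw [hof, hz]
  have hci : ((PySem.List.enumerate headers (0:Int)).foldl
      (fun d p => d.insert p.2 p.1) PySem.Dict.empty).get? k = pvLastIdx headers k :=
    pv_colIndex_eq_lastIdx headers k
  rw [hci]
  unfold pvF
  cases pvLastIdx headers k with
  | none => rfl
  | some j => exact pv_strip_pyGetD raw j

-- every value appended to `rows` is of the form raw.map strip with enough cells
def pvKeep (headers : List String) (line : String) : Option (List String) :=
  if PySem.Str.strip line ≠ "" then
    let vals := ((PySem.Str.split? line ",").getD []).map PySem.Str.strip
    if headers.length ≤ vals.length then some vals else none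
  else none

lemma pv_rows_filterMap (headers : List String) (lines : List String) :
    pvRows headers lines = lines.filterMap (pvKeep headers) := by
  unfold pvRows
  suffices h : ∀ (ls : List String) (acc : List (List String)),
      ls.foldl (fun rows line =>
        if PySem.Str.strip line ≠ "" then
          let vals := ((PySem.Str.split? line ",").getD []).map PySem.Str.strip
          if headers.length ≤ vals.length then rows ++ [vals] else rows
        else rows) acc = acc ++ ls.filterMap (pvKeep headers) by
    simpa using h lines []
  intro ls
  induction ls with
  | nil => intro acc; simp
  | cons l t ih =>
    intro acc
    rw [List.foldl_cons, ih, List.filterMap_cons]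
    by_cases hs : PySem.Str.strip l = ""
    · simp [pvKeep, hs]
    · by_cases hl : headers.length ≤ ((PySem.Str.split? l ",").getD []).length
      · simp [pvKeep, hs, hl]
      · simp [pvKeep, hs, hl]

-- A's fold over the data lines = filterMap of B's records over the kept rows
lemma pv_A_fold (headers : List String) (lines : List String) :
    ∀ (acc : List (List (String × String))),
    lines.foldl (pvA_row headers) acc
      = acc ++ (lines.filterMap (pvKeep headers)).filterMap
          (fun vals => if pvF headers "Name" vals ≠ ""
                       then some (pvRec headers vals) else none) := by
  induction lines with
  | nil => intro acc; simp
  | cons l t ih =>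
    intro acc
    simp only [List.foldl_cons, List.filterMap_cons]
    by_cases hs : PySem.Str.strip l = ""
    · rw [show pvA_row headers acc l = acc by unfold pvA_row; simp [hs]]
      rw [show pvKeep headers l = none by unfold pvKeep; simp [hs]]
      simp [ih]
    · set raw := (PySem.Str.split? l ",").getD [] with hraw
      by_cases hl : headers.length ≤ raw.length
      · have hl' : headers.length ≤ (raw.map PySem.Str.strip).length := by simpa using hl
        have hkeep : pvKeep headers l = some (raw.map PySem.Str.strip) := by
          unfold pvKeep; simp [hs, ← hraw, hl]
        rw [hkeep]
        simp only [List.filterMap_cons]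
        have hname := pv_row_field headers raw hl' "Name"
        by_cases hn : pvF headers "Name" (raw.map PySem.Str.strip) = ""
        · have hA : pvA_row headers acc l = acc := by
            unfold pvA_row
            simp only [hs, ne_eq, not_false_eq_true, if_true, ← hraw, List.length_map, hl, if_true]
            rw [hname, hn]; simp
          rw [hA, ih]; simp [hn]
        · have hA : pvA_row headers acc l
              = acc ++ [pvRec headers (raw.map PySem.Str.strip)] := by
            unfold pvA_row
            simp only [hs, ne_eq, not_false_eq_true, if_true, ← hraw, List.length_map, hl, if_true]
            rw [hname]
            simp only [hn, not_false_eq_true, if_true]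
            congr 2
            unfold pvRec pvFields
            simp only [List.map_cons, List.map_nil]
            rw [← pv_row_field headers raw hl' "DisplayName",
                ← pv_row_field headers raw hl' "State",
                ← pv_row_field headers raw hl' "StartMode",
                ← pv_row_field headers raw hl' "PathName",
                ← pv_row_field headers raw hl' "ProcessId"]
          rw [hA, ih]; simp [hn]
      · have hkeep : pvKeep headers l = none := by
          unfold pvKeep; simp [hs, ← hraw]; omega
        have hA : pvA_row headers acc l = acc := by
          unfold pvA_row; simp [hs, ← hraw]; omega
        rw [hkeep, hA, ih]

-- each column is the row-wise map of the positional field read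
lemma pv_column_eq_map (headers : List String) (rows : List (List String)) (src : String) :
    pvColumn headers rows src = rows.map (pvF headers src) := by
  unfold pvColumn pvF
  cases pvLastIdx headers src with
  | none => simp
  | some j => rfl

-- recombining by index over range(len(rows)) = a filterMap over rows
lemma pv_range_filter_map {α β : Type} (d : α) (rows : List α)
    (q : α → Bool) (g : α → β) :
    ((List.range rows.length).filter (fun k => q (rows.getD k d))).map
        (fun k => g (rows.getD k d))
      = rows.filterMap (fun r => if q r then some (g r) else none) := by
  induction rows with
  | nil => simp
  | cons r t ih =>
    simp only [List.length_cons, List.range_succ_eq_map, List.filter_cons,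
      List.filterMap_cons, List.getD_cons_zero]
    have hfm : ∀ (p : Nat → Bool),
        ((List.range t.length).map Nat.succ).filter p
          = ((List.range t.length).filter (fun k => p (Nat.succ k))).map Nat.succ := by
      intro p; rw [List.filter_map]; rfl
    by_cases hq : q r
    · simp only [hq, if_true, List.map_cons, hfm]
      simp only [List.map_map]
      simpa [List.getD_cons_succ] using congrArg (List.cons (g r)) (ih)
    · simp only [hq, Bool.false_eq_true, if_false, hfm]
      simp only [List.map_map]
      simpa [List.getD_cons_succ] using ih

-- B's final comprehension, rewritten to a filterMap over the kept rows
lemma pv_B_final (headers : List String) (rows : List (List String)) :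
    (((PySem.List.pyRange 0 rows.length 1).filter
        (fun i => PySem.List.pyGetD
          (((pvFields.map (fun f => (f.1, pvColumn headers rows f.2))).getD 0 ("", [])).2)
          i "" ≠ "")).map
      (fun i => (pvFields.map (fun f => (f.1, pvColumn headers rows f.2))).map
        (fun c => (c.1, PySem.List.pyGetD c.2 i ""))))
      = rows.filterMap
          (fun vals => if pvF headers "Name" vals ≠ ""
                       then some (pvRec headers vals) else none) := by
  have hnames : ((pvFields.map (fun f => (f.1, pvColumn headers rows f.2))).getD 0 ("", [])).2
      = rows.map (pvF headers "Name") := by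
    simp [pvFields, pv_column_eq_map]
  rw [hnames, PySem.List.pyRange_zero_nat]
  rw [List.filter_map, List.map_map]
  have hcongr1 : ∀ k ∈ List.range rows.length,
      ((fun i => decide (PySem.List.pyGetD (rows.map (pvF headers "Name")) i "" ≠ ""))
        ∘ (fun k : Nat => (k : Int))) k
        = decide (pvF headers "Name" (rows.getD k []) ≠ "") := by
    intro k hk
    have hk' : k < rows.length := List.mem_range.mp hk
    simp only [Function.comp, PySem.List.pyGetD_natCast]
    rw [List.getD_eq_getElem _ _ (by simpa using hk'), List.getElem_map,
        List.getD_eq_getElem _ _ hk']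
  rw [List.filter_congr hcongr1]
  have hcongr2 : ∀ k ∈ (List.range rows.length).filter
      (fun k => decide (pvF headers "Name" (rows.getD k []) ≠ "")),
      ((fun i => (pvFields.map (fun f => (f.1, pvColumn headers rows f.2))).map
          (fun c => (c.1, PySem.List.pyGetD c.2 i ""))) ∘ (fun k : Nat => (k : Int))) k
        = pvRec headers (rows.getD k []) := by
    intro k hk
    have hk' : k < rows.length := List.mem_range.mp (List.mem_of_mem_filter hk)
    simp only [Function.comp, pvRec, pvFields, List.map_cons, List.map_nil,
      pv_column_eq_map, PySem.List.pyGetD_natCast]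
    rw [List.getD_eq_getElem (rows.map (pvF headers "Name")) _ (by simpa using hk'),
        List.getD_eq_getElem (rows.map (pvF headers "DisplayName")) _ (by simpa using hk'),
        List.getD_eq_getElem (rows.map (pvF headers "State")) _ (by simpa using hk'),
        List.getD_eq_getElem (rows.map (pvF headers "StartMode")) _ (by simpa using hk'),
        List.getD_eq_getElem (rows.map (pvF headers "PathName")) _ (by simpa using hk'),
        List.getD_eq_getElem (rows.map (pvF headers "ProcessId")) _ (by simpa using hk'),
        List.getD_eq_getElem rows _ hk']
    simp
  rw [List.map_congr_left hcongr2]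
  refine (pv_range_filter_map [] rows
    (fun r => decide (pvF headers "Name" r ≠ "")) (pvRec headers)).trans ?_
  simp

-- ===== VERDICT (by name: the statement is the Claim_ definition above) =====
theorem parse_wmic_output_py_spec : Claim_equal_parse_wmic_output_py := by
  intro output _
  unfold Spec_parse_wmic_output_py parse_wmic_output_py parse_wmic_output_py_alt
  simp only []
  set lines := (PySem.Str.split? (PySem.Str.strip output) "\n").getD [] with hlines
  by_cases hlen : lines.length < 2
  · simp [hlen]
  · simp only [hlen, if_false]
    set headers := ((PySem.Str.split? (lines.getD 0 "") ",").getD []).map PySem.Str.strip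
    rw [pv_A_fold headers (lines.drop 1) [], List.nil_append,
        ← pv_rows_filterMap headers (lines.drop 1)]
    exact (pv_B_final headers (pvRows headers (lines.drop 1))).symm
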